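-- pv_equiv track=rewrite | github.com/pbin0117/Text-Translator | image_to_text.py | assign_box_coor
-- ===== SOURCE A (Python) =====
-- def assign_box_coor(count, d, par_num):
-- 	n_boxes = len(d['text'])
-- 	box_coor = [[100000, 100000, 0, 0] for x in range(count)]
--
-- 	# for errors of the ocr
-- 	for i in range(n_boxes-len(par_num)):
-- 		par_num.append(0)
--
-- 	num = 0
-- 	for i in range(n_boxes):
-- 	    if int(d['conf'][i]) > 60:
-- 	        (par, x, y, w, h) = (par_num[num], d['left'][i], d['top'][i], d['width'][i], d['height'][i])
--
-- 	        if x + w > box_coor[par][2]: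
-- 	        	box_coor[par][2] = x + w
-- 	        if x < box_coor[par][0]:
-- 	        	box_coor[par][0] = x
-- 	        if y + h > box_coor[par][3]:
-- 	        	box_coor[par][3] = y + h
-- 	        if y < box_coor[par][1]:
-- 	        	box_coor[par][1] = y
-- 	        num += 1
--
-- 	return box_coor
-- ===== SOURCE B (Python) =====
-- # Group confident boxes by paragraph first, then reduce each group into its bounding box.
-- def assign_box_coor(count, d, par_num):
--     n_boxes = len(d['text'])
--     for _ in range(n_boxes - len(par_num)):
--         par_num.append(0)
--
--     confident = [i for i in range(n_boxes) if int(d['conf'][i]) > 60]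
--     groups = {}
--     for par, i in zip(par_num, confident):
--         groups.setdefault(par, []).append(i)
--
--     box_coor = [[100000, 100000, 0, 0] for _ in range(count)]
--     for par, idxs in groups.items():
--         box = box_coor[par]
--         box[0] = min(box[0], min(d['left'][i] for i in idxs))
--         box[1] = min(box[1], min(d['top'][i] for i in idxs))
--         box[2] = max(box[2], max(d['left'][i] + d['width'][i] for i in idxs))
--         box[3] = max(box[3], max(d['top'][i] + d['height'][i] for i in idxs))
--     return box_coor
-- ===== Notes on version B (the rewrite author's own statement) =====
-- stated objective: alternative
-- what changed: A scans boxes once updating each paragraph's running bounding box in place with an if-cascade and a manual counter; B first filters the confident box indices, pairs them with paragraph numbers by zip, groups them into a dict keyed by paragraph, and then reduces each group's min/max extents into its paragraph row.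
import Mathlib
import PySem

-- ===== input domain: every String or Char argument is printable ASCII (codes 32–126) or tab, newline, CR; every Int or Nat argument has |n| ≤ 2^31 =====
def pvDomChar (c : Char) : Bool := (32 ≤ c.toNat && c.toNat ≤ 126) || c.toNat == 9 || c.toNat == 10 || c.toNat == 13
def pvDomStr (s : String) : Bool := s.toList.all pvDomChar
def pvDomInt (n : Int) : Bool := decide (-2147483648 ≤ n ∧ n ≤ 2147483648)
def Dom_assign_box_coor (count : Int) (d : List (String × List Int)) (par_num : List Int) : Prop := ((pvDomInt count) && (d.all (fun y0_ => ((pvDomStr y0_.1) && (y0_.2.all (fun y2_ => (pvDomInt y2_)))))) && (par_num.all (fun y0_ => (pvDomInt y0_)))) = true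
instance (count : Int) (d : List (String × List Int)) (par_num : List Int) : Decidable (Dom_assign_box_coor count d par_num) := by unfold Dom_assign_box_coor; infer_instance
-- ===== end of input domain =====

-- B replaces A's single in-place if-cascade update loop with a counter by a group-then-reduce
-- decomposition: filter the confident box indices, zip them with their paragraph numbers, group
-- them into a dict keyed by paragraph, and reduce each group's min/max extents into its row
-- (objective: alternative algorithm, same cost class).  Both A and B pad par_num in place
-- identically; the theorems are about return values.

-- shared primitive helpers (Python dict lookup, list padding, Python index normalization)
def pvDget (d : List (String × List Int)) (k : String) : List Int :=
  ((d.find? (fun kv => kv.1 == k)).map Prod.snd).getD []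

def pvHasKey (d : List (String × List Int)) (k : String) : Bool :=
  (d.find? (fun kv => kv.1 == k)).isSome

def pvPad (par_num : List Int) (n : Nat) : List Int :=
  par_num ++ List.replicate (n - par_num.length) 0

def pvNorm (count : Int) (par : Int) : Nat :=
  (if par < 0 then par + count else par).toNat

-- ===== PORT A =====
-- A's main loop: state (box_coor, num), iterating over the box indices.
def loopA (count : Int) (d : List (String × List Int)) (padded : List Int) :
    List (List Int) → Nat → List Nat → List (List Int)
  | box, _, [] => box
  | box, num, i :: rest =>
    if 60 < (pvDget d "conf").getD i 0 then
      let par := padded.getD num 0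
      let x := (pvDget d "left").getD i 0
      let y := (pvDget d "top").getD i 0
      let w := (pvDget d "width").getD i 0
      let h := (pvDget d "height").getD i 0
      let t := pvNorm count par
      let row := box.getD t []
      let row := if row.getD 2 0 < x + w then row.set 2 (x + w) else row
      let row := if x < row.getD 0 0 then row.set 0 x else row
      let row := if row.getD 3 0 < y + h then row.set 3 (y + h) else row
      let row := if y < row.getD 1 0 then row.set 1 y else row
      loopA count d padded (box.set t row) (num + 1) rest
    else
      loopA count d padded box num rest

def assign_box_coor (count : Int) (d : List (String × List Int)) (par_num : List Int) : List (List Int) :=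
  let n_boxes := (pvDget d "text").length
  let box0 := (List.range count.toNat).map (fun _ => ([100000, 100000, 0, 0] : List Int))
  let padded := pvPad par_num n_boxes
  loopA count d padded box0 0 (List.range n_boxes)

-- ===== PORT B =====
-- groups.setdefault(par, []).append(i): dict = assoc list in insertion order, append at the
-- (unique) matching key, new keys at the end (hand port of the dict mutation, exact).
def addPair : List (Int × List Nat) → Int → Nat → List (Int × List Nat)
  | [], par, i => [(par, [i])]
  | kv :: rest, par, i =>
    if kv.1 == par then (kv.1, kv.2 ++ [i]) :: rest else kv :: addPair rest par i

-- the four in-place min/max assignments B performs on the row box_coor[par]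
def rowB (d : List (String × List Int)) (idxs : List Nat) (row : List Int) : List Int :=
  let row := row.set 0 (min (row.getD 0 0)
    ((PySem.List.min? (idxs.map (fun i => (pvDget d "left").getD i 0)) (fun v => v)).getD 0))
  let row := row.set 1 (min (row.getD 1 0)
    ((PySem.List.min? (idxs.map (fun i => (pvDget d "top").getD i 0)) (fun v => v)).getD 0))
  let row := row.set 2 (max (row.getD 2 0)
    ((PySem.List.max? (idxs.map (fun i => (pvDget d "left").getD i 0 + (pvDget d "width").getD i 0)) (fun v => v)).getD 0))
  row.set 3 (max (row.getD 3 0)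
    ((PySem.List.max? (idxs.map (fun i => (pvDget d "top").getD i 0 + (pvDget d "height").getD i 0)) (fun v => v)).getD 0))

def updB (count : Int) (d : List (String × List Int)) (box : List (List Int)) (kv : Int × List Nat) : List (List Int) :=
  let t := pvNorm count kv.1
  box.set t (rowB d kv.2 (box.getD t []))

def assign_box_coor_alt (count : Int) (d : List (String × List Int)) (par_num : List Int) : List (List Int) :=
  let n_boxes := (pvDget d "text").length
  let padded := pvPad par_num n_boxes
  let confident := (List.range n_boxes).filter (fun i => decide (60 < (pvDget d "conf").getD i 0))
  let groups := List.foldl (fun g q => addPair g q.1 q.2) [] (padded.zip confident)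
  List.foldl (updB count d)
    ((List.range count.toNat).map (fun _ => ([100000, 100000, 0, 0] : List Int))) groups

-- ===== PRECONDITION & SPEC =====
def pvNumBefore (d : List (String × List Int)) (i : Nat) : Nat :=
  ((pvDget d "conf").take i).countP (fun c => decide (60 < c))

-- Pre_ is exactly where the Python A returns: the 'text' key exists, and every visited index has
-- a conf entry, every confident index has the four coordinate entries, and its paragraph number
-- (read from the padded par_num at the count of earlier confident boxes) is a valid Python index
-- into the count paragraph slots.
def Pre_assign_box_coor (count : Int) (d : List (String × List Int)) (par_num : List Int) : Prop :=
  pvHasKey d "text" = true ∧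
  ∀ i, i < (pvDget d "text").length →
    pvHasKey d "conf" = true ∧ i < (pvDget d "conf").length ∧
    (60 < (pvDget d "conf").getD i 0 →
      pvHasKey d "left" = true ∧ i < (pvDget d "left").length ∧
      pvHasKey d "top" = true ∧ i < (pvDget d "top").length ∧
      pvHasKey d "width" = true ∧ i < (pvDget d "width").length ∧
      pvHasKey d "height" = true ∧ i < (pvDget d "height").length ∧
      -count ≤ (pvPad par_num (pvDget d "text").length).getD (pvNumBefore d i) 0 ∧
      (pvPad par_num (pvDget d "text").length).getD (pvNumBefore d i) 0 < count)

instance (count : Int) (d : List (String × List Int)) (par_num : List Int) : Decidable (Pre_assign_box_coor count d par_num) := by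
  unfold Pre_assign_box_coor; infer_instance

def pvWitness_assign_box_coor : Int × (List (String × List Int)) × List Int :=
  (1, [("text", [1]), ("conf", [90]), ("left", [5]), ("top", [6]), ("width", [2]), ("height", [3])], [0])

def Spec_assign_box_coor (count : Int) (d : List (String × List Int)) (par_num : List Int) (out : List (List Int)) : Prop := out = assign_box_coor_alt count d par_num
instance (count : Int) (d : List (String × List Int)) (par_num : List Int) (out : List (List Int)) : Decidable (Spec_assign_box_coor count d par_num out) := by unfold Spec_assign_box_coor; infer_instance

-- ===== CLAIM (what is proved, stated in full; the proofs are below) =====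
def Claim_equal_assign_box_coor : Prop := ∀ (count : Int) (d : List (String × List Int)) (par_num : List Int), Dom_assign_box_coor count d par_num → Pre_assign_box_coor count d par_num → Spec_assign_box_coor count d par_num (assign_box_coor count d par_num)

-- ===== LEMMAS AND PROOFS =====

-- the per-entry row update A performs (reading the partially updated row, as the Python does)
def updRow (e : Int × Int × Int × Int × Int) (row : List Int) : List Int :=
  let row := if row.getD 2 0 < e.2.2.2.1 then row.set 2 e.2.2.2.1 else row
  let row := if e.2.1 < row.getD 0 0 then row.set 0 e.2.1 else row
  let row := if row.getD 3 0 < e.2.2.2.2 then row.set 3 e.2.2.2.2 else row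
  if e.2.2.1 < row.getD 1 0 then row.set 1 e.2.2.1 else row

def updA (count : Int) (box : List (List Int)) (e : Int × Int × Int × Int × Int) : List (List Int) :=
  box.set (pvNorm count e.1) (updRow e (box.getD (pvNorm count e.1) []))

-- the (paragraph, corners) entry list A's loop traverses
def ents (count : Int) (d : List (String × List Int)) (padded : List Int) :
    Nat → List Nat → List (Int × Int × Int × Int × Int)
  | _, [] => []
  | num, i :: rest =>
    if 60 < (pvDget d "conf").getD i 0 then
      (padded.getD num 0, (pvDget d "left").getD i 0, (pvDget d "top").getD i 0,
       (pvDget d "left").getD i 0 + (pvDget d "width").getD i 0,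
       (pvDget d "top").getD i 0 + (pvDget d "height").getD i 0) :: ents count d padded (num + 1) rest
    else ents count d padded num rest

lemma loopA_eq_foldl (count : Int) (d : List (String × List Int)) (padded : List Int) :
    ∀ (is : List Nat) (box : List (List Int)) (num : Nat),
      loopA count d padded box num is = List.foldl (updA count) box (ents count d padded num is) := by
  intro is
  induction is with
  | nil => intro box num; rfl
  | cons i rest ih =>
    intro box num
    simp only [loopA, ents]
    by_cases h : 60 < (pvDget d "conf").getD i 0
    · rw [if_pos h, if_pos h, ih, List.foldl_cons]
      rfl
    · rw [if_neg h, if_neg h, ih]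

lemma updA_length (count : Int) (box : List (List Int)) (e : Int × Int × Int × Int × Int) :
    (updA count box e).length = box.length := by
  simp [updA]

lemma foldl_updA_length (count : Int) (l : List (Int × Int × Int × Int × Int)) :
    ∀ box, (List.foldl (updA count) box l).length = box.length := by
  induction l with
  | nil => intro box; rfl
  | cons e l ih => intro box; simp [List.foldl, ih, updA_length]

lemma foldl_updA_getD (count : Int) (l : List (Int × Int × Int × Int × Int)) :
    ∀ (box : List (List Int)) (s : Nat), s < box.length →
      (List.foldl (updA count) box l).getD s [] =
        List.foldl (fun row e => updRow e row) (box.getD s [])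
          (l.filter (fun e => pvNorm count e.1 == s)) := by
  induction l with
  | nil => intro box s _; rfl
  | cons e l ih =>
    intro box s hs
    have hlen : s < (updA count box e).length := by rw [updA_length]; exact hs
    by_cases ht : pvNorm count e.1 = s
    · have hget : (updA count box e).getD s [] = updRow e (box.getD s []) := by
        simp [updA, ht, List.getD, hs]
      have hb : (pvNorm count e.1 == s) = true := by simp [ht]
      simp only [List.foldl, List.filter, hb]
      rw [ih (updA count box e) s hlen, hget]
    · have hget : (updA count box e).getD s [] = box.getD s [] := by
        simp [updA, List.getD, ht]
      have hb : (pvNorm count e.1 == s) = false := by simp [ht]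
      simp only [List.foldl, List.filter, hb]
      rw [ih (updA count box e) s hlen, hget]

lemma updRow_components (e : Int × Int × Int × Int × Int) (a b c dd : Int) :
    updRow e [a, b, c, dd] = [min a e.2.1, min b e.2.2.1, max c e.2.2.2.1, max dd e.2.2.2.2] := by
  obtain ⟨p, x1, y1, x2, y2⟩ := e
  simp only [updRow, List.set, List.getD, List.getElem?_cons_zero, List.getElem?_cons_succ]
  split_ifs <;> simp_all [min_def, max_def] <;> omega

lemma rowfold (l : List (Int × Int × Int × Int × Int)) :
    ∀ a b c dd : Int,
      List.foldl (fun row e => updRow e row) [a, b, c, dd] l =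
        [List.foldl min a (l.map (fun e => e.2.1)), List.foldl min b (l.map (fun e => e.2.2.1)),
         List.foldl max c (l.map (fun e => e.2.2.2.1)), List.foldl max dd (l.map (fun e => e.2.2.2.2))] := by
  induction l with
  | nil => intro a b c dd; rfl
  | cons e l ih =>
    intro a b c dd
    simp only [List.foldl, List.map, updRow_components]
    exact ih _ _ _ _

-- A's entry list is exactly the zip of padded paragraph numbers with the confident indices
lemma ents_eq_zip (count : Int) (d : List (String × List Int)) (padded : List Int) :
    ∀ (is : List Nat) (num : Nat),
      num + is.countP (fun i => decide (60 < (pvDget d "conf").getD i 0)) ≤ padded.length →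
      ents count d padded num is =
        ((padded.drop num).zip (is.filter (fun i => decide (60 < (pvDget d "conf").getD i 0)))).map
          (fun q => (q.1, (pvDget d "left").getD q.2 0, (pvDget d "top").getD q.2 0,
                     (pvDget d "left").getD q.2 0 + (pvDget d "width").getD q.2 0,
                     (pvDget d "top").getD q.2 0 + (pvDget d "height").getD q.2 0)) := by
  intro is
  induction is with
  | nil => intro num _; simp [ents]
  | cons i rest ih =>
    intro num hb
    rw [List.countP_cons] at hb
    by_cases h : 60 < (pvDget d "conf").getD i 0
    · have hb' : num + 1 + rest.countP (fun i => decide (60 < (pvDget d "conf").getD i 0)) ≤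
          padded.length := by
        simp only [h, decide_true, if_pos] at hb; omega
      have hnum : num < padded.length := by omega
      have hdrop : padded.drop num = padded[num] :: padded.drop (num + 1) :=
        List.drop_eq_getElem_cons hnum
      have hgd : padded.getD num 0 = padded[num] := by
        rw [List.getD_eq_getElem?_getD, List.getElem?_eq_getElem hnum]; rfl
      simp only [ents, if_pos h]
      rw [List.filter_cons_of_pos (by simpa using h), hdrop, List.zip_cons_cons, List.map_cons,
          ih (num + 1) (by omega), hgd]
    · simp only [ents, if_neg h]
      rw [List.filter_cons_of_neg (by simpa using h)]
      exact ih num (by simp only [h, decide_false] at hb; omega)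

-- B-side: per-slot decomposition of the group-update fold
lemma updB_length (count : Int) (d : List (String × List Int)) (box : List (List Int)) (kv : Int × List Nat) :
    (updB count d box kv).length = box.length := by
  simp [updB]

lemma foldl_updB_length (count : Int) (d : List (String × List Int)) (l : List (Int × List Nat)) :
    ∀ box, (List.foldl (updB count d) box l).length = box.length := by
  induction l with
  | nil => intro box; rfl
  | cons kv l ih => intro box; simp [List.foldl, ih, updB_length]

lemma foldl_updB_getD (count : Int) (d : List (String × List Int)) (l : List (Int × List Nat)) :
    ∀ (box : List (List Int)) (s : Nat), s < box.length →
      (List.foldl (updB count d) box l).getD s [] =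
        List.foldl (fun row kv => rowB d kv.2 row) (box.getD s [])
          (l.filter (fun kv => pvNorm count kv.1 == s)) := by
  induction l with
  | nil => intro box s _; rfl
  | cons kv l ih =>
    intro box s hs
    have hlen : s < (updB count d box kv).length := by rw [updB_length]; exact hs
    by_cases ht : pvNorm count kv.1 = s
    · have hget : (updB count d box kv).getD s [] = rowB d kv.2 (box.getD s []) := by
        simp [updB, ht, List.getD, hs]
      have hb : (pvNorm count kv.1 == s) = true := by simp [ht]
      simp only [List.foldl, List.filter, hb]
      rw [ih (updB count d box kv) s hlen, hget]
    · have hget : (updB count d box kv).getD s [] = box.getD s [] := by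
        simp [updB, List.getD, ht]
      have hb : (pvNorm count kv.1 == s) = false := by simp [ht]
      simp only [List.foldl, List.filter, hb]
      rw [ih (updB count d box kv) s hlen, hget]

lemma foldl_min_min (l : List Int) : ∀ a b : Int,
    List.foldl min (min a b) l = min a (List.foldl min b l) := by
  induction l with
  | nil => intro a b; rfl
  | cons x l ih => intro a b; simp only [List.foldl, min_assoc]; exact ih a (min b x)

lemma foldl_max_max (l : List Int) : ∀ a b : Int,
    List.foldl max (max a b) l = max a (List.foldl max b l) := by
  induction l with
  | nil => intro a b; rfl
  | cons x l ih => intro a b; simp only [List.foldl, max_assoc]; exact ih a (max b x)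

lemma rowB_components (d : List (String × List Int)) (idxs : List Nat) (h : idxs ≠ [])
    (a b c dd : Int) :
    rowB d idxs [a, b, c, dd] =
      [List.foldl min a (idxs.map (fun i => (pvDget d "left").getD i 0)),
       List.foldl min b (idxs.map (fun i => (pvDget d "top").getD i 0)),
       List.foldl max c (idxs.map (fun i => (pvDget d "left").getD i 0 + (pvDget d "width").getD i 0)),
       List.foldl max dd (idxs.map (fun i => (pvDget d "top").getD i 0 + (pvDget d "height").getD i 0))] := by
  obtain ⟨j, t, rfl⟩ : ∃ j t, idxs = j :: t := by
    cases idxs with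
    | nil => exact absurd rfl h
    | cons j t => exact ⟨j, t, rfl⟩
  simp only [rowB, List.map_cons, PySem.List.min?_id_cons, PySem.List.max?_id_cons, List.set, List.getD, List.getElem?_cons_zero, List.getElem?_cons_succ,
    Option.getD, List.foldl]
  rw [← foldl_min_min, ← foldl_min_min, ← foldl_max_max, ← foldl_max_max]

lemma rowfoldB (d : List (String × List Int)) (gs : List (Int × List Nat)) :
    ∀ a b c dd : Int, (∀ kv ∈ gs, kv.2 ≠ []) →
      List.foldl (fun row kv => rowB d kv.2 row) [a, b, c, dd] gs =
        [List.foldl min a ((gs.flatMap (fun kv => kv.2)).map (fun i => (pvDget d "left").getD i 0)),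
         List.foldl min b ((gs.flatMap (fun kv => kv.2)).map (fun i => (pvDget d "top").getD i 0)),
         List.foldl max c ((gs.flatMap (fun kv => kv.2)).map (fun i => (pvDget d "left").getD i 0 + (pvDget d "width").getD i 0)),
         List.foldl max dd ((gs.flatMap (fun kv => kv.2)).map (fun i => (pvDget d "top").getD i 0 + (pvDget d "height").getD i 0))] := by
  induction gs with
  | nil => intro a b c dd _; simp
  | cons kv gs ih =>
    intro a b c dd hne
    have hkv : kv.2 ≠ [] := hne kv (List.mem_cons_self ..)
    simp only [List.foldl, rowB_components d kv.2 hkv]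
    rw [ih _ _ _ _ (fun x hx => hne x (List.mem_cons_of_mem _ hx))]
    simp [List.flatMap_cons, List.map_append, List.foldl_append]

-- the indices contributing to slot s among the grouped entries
def fsIdx (count : Int) (s : Nat) (g : List (Int × List Nat)) : List Nat :=
  (g.filter (fun kv => pvNorm count kv.1 == s)).flatMap (fun kv => kv.2)

lemma addPair_fs (count : Int) (s : Nat) (k : Int) (i : Nat) :
    ∀ g, (fsIdx count s (addPair g k i)).Perm
      (fsIdx count s g ++ (if pvNorm count k == s then [i] else [])) := by
  intro g
  induction g with
  | nil =>
    by_cases h : pvNorm count k == s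
    · simp [addPair, fsIdx, h]
    · simp [addPair, fsIdx, h]
  | cons kv rest ih =>
    simp only [addPair]
    by_cases hk : kv.1 == k
    · have hkk : kv.1 = k := by simpa using hk
      rw [if_pos hk]
      by_cases hs : pvNorm count k == s
      · have hs' : (pvNorm count kv.1 == s) = true := by rw [hkk]; exact hs
        simp only [fsIdx, List.filter_cons, hs', if_pos, List.flatMap_cons, hs]
        rw [List.append_assoc, List.append_assoc]
        exact (List.Perm.append_left kv.2 (by simpa using List.perm_append_comm (l₁ := [i])))
      · have hs' : (pvNorm count kv.1 == s) = false := by rw [hkk]; simpa using hs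
        simp [fsIdx, hs', hs]
    · rw [if_neg hk]
      by_cases hs : pvNorm count kv.1 == s
      · simp only [fsIdx, List.filter_cons, hs, if_pos, List.flatMap_cons] at *
        rw [List.append_assoc]
        exact List.Perm.append_left kv.2 ih
      · simp only [fsIdx, List.filter_cons, hs] at *
        simpa using ih

lemma build_fs (count : Int) (s : Nat) :
    ∀ (P : List (Int × Nat)) (g : List (Int × List Nat)),
      (fsIdx count s (List.foldl (fun g q => addPair g q.1 q.2) g P)).Perm
        (fsIdx count s g ++ (P.filter (fun q => pvNorm count q.1 == s)).map Prod.snd) := by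
  intro P
  induction P with
  | nil => intro g; simp
  | cons q P ih =>
    intro g
    have h1 := (ih (addPair g q.1 q.2)).trans
      (List.Perm.append_right _ (addPair_fs count s q.1 q.2 g))
    by_cases hs : pvNorm count q.1 == s
    · simpa [List.filter_cons, hs, List.append_assoc] using h1
    · simpa [List.filter_cons, hs] using h1

lemma addPair_vals (k : Int) (i : Nat) :
    ∀ g, (∀ kv ∈ g, kv.2 ≠ ([] : List Nat)) → ∀ kv ∈ addPair g k i, kv.2 ≠ [] := by
  intro g
  induction g with
  | nil => intro _ kv hkv; simp [addPair] at hkv; simp [hkv]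
  | cons kv0 rest ih =>
    intro hg kv hkv
    simp only [addPair] at hkv
    by_cases hk : kv0.1 == k
    · rw [if_pos hk] at hkv
      rcases List.mem_cons.mp hkv with rfl | h
      · simp
      · exact hg kv (List.mem_cons_of_mem _ h)
    · rw [if_neg hk] at hkv
      rcases List.mem_cons.mp hkv with rfl | h
      · exact hg kv (List.mem_cons_self ..)
      · exact ih (fun x hx => hg x (List.mem_cons_of_mem _ hx)) kv h

lemma build_vals :
    ∀ (P : List (Int × Nat)) (g : List (Int × List Nat)),
      (∀ kv ∈ g, kv.2 ≠ ([] : List Nat)) →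
      ∀ kv ∈ List.foldl (fun g q => addPair g q.1 q.2) g P, kv.2 ≠ [] := by
  intro P
  induction P with
  | nil => intro g hg; exact hg
  | cons q P ih => intro g hg; exact ih _ (addPair_vals q.1 q.2 g hg)

-- ===== VERDICT (by name: the statement is the Claim_ definition above) =====
theorem assign_box_coor_spec : Claim_equal_assign_box_coor := by
  intro count d par_num _ _
  unfold Spec_assign_box_coor
  simp only [assign_box_coor, assign_box_coor_alt]
  set n := (pvDget d "text").length with hn
  set padded := pvPad par_num n with hpad
  set pconf : Nat → Bool := fun i => decide (60 < (pvDget d "conf").getD i 0) with hpconf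
  set P : List (Int × Nat) := padded.zip ((List.range n).filter pconf) with hP
  have hpadlen : n ≤ padded.length := by
    simp only [hpad, pvPad, List.length_append, List.length_replicate]
    omega
  have hents : ents count d padded 0 (List.range n) =
      P.map (fun q => (q.1, (pvDget d "left").getD q.2 0, (pvDget d "top").getD q.2 0,
        (pvDget d "left").getD q.2 0 + (pvDget d "width").getD q.2 0,
        (pvDget d "top").getD q.2 0 + (pvDget d "height").getD q.2 0)) := by
    rw [ents_eq_zip count d padded (List.range n) 0
      (by have := List.countP_le_length (l := List.range n)
            (p := fun i => decide (60 < (pvDget d "conf").getD i 0))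
          simpa using le_trans (by simpa using this) hpadlen)]
    simp [hP, hpconf]
  rw [loopA_eq_foldl, hents]
  set groups := List.foldl (fun g q => addPair g q.1 q.2) ([] : List (Int × List Nat)) P with hgroups
  have hboxlen : ((List.range count.toNat).map (fun _ => ([100000, 100000, 0, 0] : List Int))).length = count.toNat := by simp
  apply List.ext_getElem
  · rw [foldl_updA_length, foldl_updB_length]
  · intro s hs1 hs2
    rw [foldl_updA_length, hboxlen] at hs1
    have hgd : ∀ (l : List (List Int)) (i : Nat) (h : i < l.length), l[i] = l.getD i [] := by
      intro l i h; simp [List.getD, List.getElem?_eq_getElem h]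
    rw [hgd _ s (by rw [foldl_updA_length, hboxlen]; exact hs1),
        hgd _ s (by rw [foldl_updB_length, hboxlen]; exact hs1)]
    rw [foldl_updA_getD count _ _ s (by rw [hboxlen]; exact hs1),
        foldl_updB_getD count d _ _ s (by rw [hboxlen]; exact hs1)]
    have hb0 : ((List.range count.toNat).map (fun _ => ([100000, 100000, 0, 0] : List Int))).getD s [] = [100000, 100000, 0, 0] := by
      simp [List.getD, hs1]
    rw [hb0]
    -- A side: filter through the map, then reduce the row fold to four min/max folds
    rw [List.filter_map, rowfold]
    -- B side: reduce the grouped fold to four min/max folds over the flattened groups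
    rw [rowfoldB d _ _ _ _ _ (fun kv hkv => build_vals P [] (by simp) kv (List.mem_filter.mp hkv).1)]
    have hperm : ((groups.filter (fun kv => pvNorm count kv.1 == s)).flatMap (fun kv => kv.2)).Perm
        ((P.filter (fun q => pvNorm count q.1 == s)).map Prod.snd) := by
      have := build_fs count s P []
      simpa [fsIdx] using this
    have key : ∀ (f : Nat → Int) (a : Int) (op : Int → Int → Int),
        Std.Commutative op → Std.Associative op →
        List.foldl op a (((groups.filter (fun kv => pvNorm count kv.1 == s)).flatMap (fun kv => kv.2)).map f) =
        List.foldl op a ((P.filter (fun q => pvNorm count q.1 == s)).map Prod.snd |>.map f) := by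
      intro f a op hc ha
      haveI := hc; haveI := ha
      exact (hperm.map f).foldl_eq a
    rw [key _ _ min ⟨min_comm⟩ ⟨min_assoc⟩, key _ _ min ⟨min_comm⟩ ⟨min_assoc⟩,
        key _ _ max ⟨max_comm⟩ ⟨max_assoc⟩, key _ _ max ⟨max_comm⟩ ⟨max_assoc⟩]
    simp [List.map_map, Function.comp_def]
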